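-- pv_equiv track=rewrite | github.com/MichalDrosio/python-basic | CodersWars/Adjacent_repeated_words_in_a_string.py | count_adjacent_pairs
-- ===== SOURCE A (Python) =====
-- def count_adjacent_pairs(st):
--     if not st:
--         return 0
--     res = 0
--     arr = st.lower().split()
--     for i in range(len(arr)-1):
--         if i == 0:
--             if arr[i] == arr[i+1]:
--                 res += 1
--         elif arr[i] == arr[i+1] != arr[i-1]:
--             res += 1
--     return res
-- ===== SOURCE B (Python) =====
-- def count_adjacent_pairs(st):
--     if not st:
--         return 0
--     a = st.lower().split()
--     pairs = sum(x == y for x, y in zip(a, a[1:]))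
--     triples = sum(x == y == z for x, y, z in zip(a, a[1:], a[2:]))
--     return pairs - triples
-- ===== Notes on version B (the rewrite author's own statement) =====
-- stated objective: alternative
-- what changed: Replaces the stateful index loop (i==0 special case, arr[i-1] look-back) by the inclusion-exclusion identity: number of maximal runs of length>=2 equals (count of equal adjacent pairs) minus (count of equal adjacent triples), computed with two zip scans and no per-element state.
import Mathlib
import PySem

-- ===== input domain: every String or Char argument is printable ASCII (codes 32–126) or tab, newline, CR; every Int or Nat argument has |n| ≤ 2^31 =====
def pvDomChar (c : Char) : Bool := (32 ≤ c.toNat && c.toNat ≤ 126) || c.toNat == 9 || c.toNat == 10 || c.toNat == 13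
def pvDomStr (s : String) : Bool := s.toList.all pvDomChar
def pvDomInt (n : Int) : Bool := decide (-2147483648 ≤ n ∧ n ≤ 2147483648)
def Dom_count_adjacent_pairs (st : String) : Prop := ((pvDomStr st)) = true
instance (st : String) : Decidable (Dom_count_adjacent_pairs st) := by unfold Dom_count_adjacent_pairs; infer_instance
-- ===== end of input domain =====

-- B replaces A's stateful index loop (i==0 special case, arr[i-1] look-back) by the
-- inclusion-exclusion identity  #(runs of length ≥ 2) = #(equal adjacent pairs) − #(equal adjacent triples),
-- computed with two zip scans; same asymptotic cost.

-- ===== PORT A =====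
def count_adjacent_pairs (st : String) : Int :=
  if st = "" then 0
  else
    let arr := PySem.Str.split₀ (PySem.Str.lower st)
    (PySem.List.pyRange 0 ((arr.length : Int) - 1)).foldl
      (fun res i =>
        if i = 0 then
          if PySem.List.pyGetD arr i "" = PySem.List.pyGetD arr (i + 1) "" then res + 1 else res
        else
          if PySem.List.pyGetD arr i "" = PySem.List.pyGetD arr (i + 1) "" ∧
             PySem.List.pyGetD arr (i + 1) "" ≠ PySem.List.pyGetD arr (i - 1) "" then res + 1
          else res)
      0

-- ===== PORT B =====
def count_adjacent_pairs_alt (st : String) : Int :=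
  if st = "" then 0
  else
    let a := PySem.Str.split₀ (PySem.Str.lower st)
    let pairs : Int :=
      ((a.zip (PySem.List.slice a (some 1) none)).countP (fun p => p.1 == p.2) : Nat)
    let triples : Int :=
      ((a.zip ((PySem.List.slice a (some 1) none).zip (PySem.List.slice a (some 2) none))).countP
        (fun t => t.1 == t.2.1 && t.2.1 == t.2.2) : Nat)
    pairs - triples

-- ===== PRECONDITION & SPEC =====
def Spec_count_adjacent_pairs (st : String) (out : Int) : Prop := out = count_adjacent_pairs_alt st
instance (st : String) (out : Int) : Decidable (Spec_count_adjacent_pairs st out) := by unfold Spec_count_adjacent_pairs; infer_instance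

-- ===== CLAIM (what is proved, stated in full; the proofs are below) =====
def Claim_equal_count_adjacent_pairs : Prop := ∀ (st : String), Dom_count_adjacent_pairs st → Spec_count_adjacent_pairs st (count_adjacent_pairs st)

-- ===== LEMMAS AND PROOFS =====

-- A's count, recursively: count pair (x,y) when x = y and y differs from the previous word p
-- (p = none at the front, where A's i == 0 branch imposes no look-back condition).
def cntA (p : Option String) : List String → Int
  | [] => 0
  | [_] => 0
  | x :: y :: rest => (if x = y ∧ some y ≠ p then 1 else 0) + cntA (some x) (y :: rest)

-- recursive forms of B's two zip counts
def pairsCnt : List String → Int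
  | x :: y :: rest => (if x = y then 1 else 0) + pairsCnt (y :: rest)
  | _ => 0

def triplesCnt : List String → Int
  | x :: y :: z :: rest => (if x = y ∧ y = z then 1 else 0) + triplesCnt (y :: z :: rest)
  | _ => 0

-- 1 if the list starts with an equal pair whose word is the look-back p, else 0
def frontRun (p : Option String) : List String → Int
  | x :: y :: _ => if x = y ∧ some y = p then 1 else 0
  | _ => 0

-- A's loop body, generalized by the look-back word p for the i = 0 slot.
def bodyGen (arr : List String) (p : Option String) (res : Int) (i : Int) : Int :=
  if (PySem.List.pyGetD arr i "" = PySem.List.pyGetD arr (i + 1) "") ∧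
     (if i = 0 then some (PySem.List.pyGetD arr (i + 1) "") ≠ p
      else PySem.List.pyGetD arr (i + 1) "" ≠ PySem.List.pyGetD arr (i - 1) "") then res + 1
  else res

lemma getD_shift (x : String) (l : List String) (i : Int) (hi : 0 ≤ i) :
    PySem.List.pyGetD (x :: l) (i + 1) "" = PySem.List.pyGetD l i "" := by
  rw [PySem.List.pyGetD_of_nonneg _ _ (by omega), PySem.List.pyGetD_of_nonneg _ _ hi,
      show (i + 1).toNat = i.toNat + 1 from by omega]
  rfl

lemma bodyGen_shift (x y : String) (rest : List String) (p : Option String) (acc : Int) (k : Nat) :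
    bodyGen (x :: y :: rest) p acc ((0 : Int) + 1 + (k : Int))
      = bodyGen (y :: rest) (some x) acc ((0 : Int) + (k : Int)) := by
  cases k with
  | zero =>
    simp only [bodyGen, Nat.cast_zero, add_zero]
    norm_num
    simp [PySem.List.pyGetD_ofNat']
  | succ j =>
    simp only [bodyGen]
    have e1 : PySem.List.pyGetD (x :: y :: rest) ((0:Int) + 1 + ((j+1 : Nat) : Int)) ""
        = PySem.List.pyGetD (y :: rest) ((0:Int) + ((j+1 : Nat) : Int)) "" := by
      rw [show (0:Int) + 1 + ((j+1 : Nat) : Int) = ((0:Int) + ((j+1 : Nat) : Int)) + 1 from by ring]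
      exact getD_shift _ _ _ (by positivity)
    have e2 : PySem.List.pyGetD (x :: y :: rest) ((0:Int) + 1 + ((j+1 : Nat) : Int) + 1) ""
        = PySem.List.pyGetD (y :: rest) ((0:Int) + ((j+1 : Nat) : Int) + 1) "" := by
      rw [show (0:Int) + 1 + ((j+1 : Nat) : Int) + 1 = ((0:Int) + ((j+1 : Nat) : Int) + 1) + 1 from by ring]
      exact getD_shift _ _ _ (by positivity)
    have e3 : PySem.List.pyGetD (x :: y :: rest) ((0:Int) + 1 + ((j+1 : Nat) : Int) - 1) ""
        = PySem.List.pyGetD (y :: rest) ((0:Int) + ((j+1 : Nat) : Int) - 1) "" := by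
      rw [show (0:Int) + 1 + ((j+1 : Nat) : Int) - 1 = ((0:Int) + ((j+1 : Nat) : Int) - 1) + 1 from by ring]
      exact getD_shift _ _ _ (by push_cast; omega)
    have h1 : ¬ ((0:Int) + 1 + ((j+1 : Nat) : Int) = 0) := by push_cast; omega
    have h2 : ¬ ((0:Int) + ((j+1 : Nat) : Int) = 0) := by push_cast; omega
    simp only [if_neg h1, if_neg h2, e1, e2, e3]

lemma foldGen_eq_cntA (arr : List String) : ∀ (p : Option String) (res : Int),
    (PySem.List.pyRange 0 ((arr.length : Int) - 1)).foldl (bodyGen arr p) res = res + cntA p arr := by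
  induction arr with
  | nil => intro p res; rw [PySem.List.pyRange_one_eq_nil (by simp)]; simp [cntA]
  | cons x t ih =>
    intro p res
    cases t with
    | nil => rw [PySem.List.pyRange_one_eq_nil (by simp)]; simp [cntA]
    | cons y rest =>
      rw [PySem.List.pyRange_one_cons (by simp)]
      simp only [List.foldl_cons]
      have h0 : bodyGen (x :: y :: rest) p res 0 = res + (if x = y ∧ some y ≠ p then 1 else 0) := by
        simp only [bodyGen]
        have hx : PySem.List.pyGetD (x :: y :: rest) (0 : Int) "" = x := by
          simp [PySem.List.pyGetD_ofNat']
        have hy : PySem.List.pyGetD (x :: y :: rest) ((0 : Int) + 1) "" = y := by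
          simpa using PySem.List.pyGetD_natCast (x :: y :: rest) 1 ""
        rw [hx, hy]
        by_cases hc : x = y ∧ some y ≠ p
        · simp [hc]
        · simp [hc]
      have hshift :
          (PySem.List.pyRange (0 + 1) (((x :: y :: rest).length : Int) - 1)).foldl
              (bodyGen (x :: y :: rest) p) (bodyGen (x :: y :: rest) p res 0)
            = (PySem.List.pyRange 0 (((y :: rest).length : Int) - 1)).foldl
              (bodyGen (y :: rest) (some x)) (bodyGen (x :: y :: rest) p res 0) := by
        rw [PySem.List.pyRange_one (0 + 1), PySem.List.pyRange_one 0]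
        have hlen : (((x :: y :: rest).length : Int) - 1 - (0 + 1)).toNat = rest.length := by
          simp only [List.length_cons]; push_cast; omega
        have hlen' : (((y :: rest).length : Int) - 1 - 0).toNat = rest.length := by
          simp only [List.length_cons]; push_cast; omega
        rw [hlen, hlen', List.foldl_map, List.foldl_map]
        apply PySem.List.foldl_congr_mem
        intro acc k _
        exact bodyGen_shift x y rest p acc k
      rw [hshift, ih (some x) (bodyGen (x :: y :: rest) p res 0), h0]
      simp only [cntA]
      ring

-- the port's literal loop body is bodyGen with p = none
lemma foldA_eq_cntA (arr : List String) :
    (PySem.List.pyRange 0 ((arr.length : Int) - 1)).foldl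
      (fun res i =>
        if i = 0 then
          if PySem.List.pyGetD arr i "" = PySem.List.pyGetD arr (i + 1) "" then res + 1 else res
        else
          if PySem.List.pyGetD arr i "" = PySem.List.pyGetD arr (i + 1) "" ∧
             PySem.List.pyGetD arr (i + 1) "" ≠ PySem.List.pyGetD arr (i - 1) "" then res + 1
          else res)
      0 = cntA none arr := by
  have h : (PySem.List.pyRange 0 ((arr.length : Int) - 1)).foldl
      (fun res i =>
        if i = 0 then
          if PySem.List.pyGetD arr i "" = PySem.List.pyGetD arr (i + 1) "" then res + 1 else res
        else
          if PySem.List.pyGetD arr i "" = PySem.List.pyGetD arr (i + 1) "" ∧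
             PySem.List.pyGetD arr (i + 1) "" ≠ PySem.List.pyGetD arr (i - 1) "" then res + 1
          else res)
      0 = (PySem.List.pyRange 0 ((arr.length : Int) - 1)).foldl (bodyGen arr none) 0 := by
    apply PySem.List.foldl_congr_mem
    intro acc i _
    simp only [bodyGen]
    by_cases hi : i = 0 <;> simp [hi]
  rw [h, foldGen_eq_cntA arr none 0, zero_add]

-- B's first zip count is pairsCnt
lemma zip_pairs_eq (l : List String) :
    (((l.zip (l.drop 1)).countP (fun p => p.1 == p.2) : Nat) : Int) = pairsCnt l := by
  induction l with
  | nil => simp [pairsCnt]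
  | cons x t ih =>
    cases t with
    | nil => simp [pairsCnt]
    | cons y rest =>
      have : (x :: y :: rest).zip ((x :: y :: rest).drop 1) = (x, y) :: (y :: rest).zip rest := by
        simp [List.zip]
      rw [this]
      simp only [List.countP_cons, pairsCnt]
      have ih' := ih
      simp only [List.drop_one, List.tail_cons] at ih'
      by_cases hxy : x = y
      · simp [hxy] at ih' ⊢; omega
      · have : (x == y) = false := by simp [hxy]
        simp [this, hxy, ih']

-- B's second zip count is triplesCnt
lemma zip_triples_eq (l : List String) :
    (((l.zip ((l.drop 1).zip (l.drop 2))).countP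
        (fun t => t.1 == t.2.1 && t.2.1 == t.2.2) : Nat) : Int) = triplesCnt l := by
  induction l with
  | nil => simp [triplesCnt]
  | cons x t ih =>
    cases t with
    | nil => simp [triplesCnt]
    | cons y rest =>
      cases rest with
      | nil => simp [triplesCnt]
      | cons z rs =>
        have hz : (x :: y :: z :: rs).zip (((x :: y :: z :: rs).drop 1).zip ((x :: y :: z :: rs).drop 2))
            = (x, (y, z)) :: (y :: z :: rs).zip ((z :: rs).zip rs) := by
          simp [List.zip]
        rw [hz]
        simp only [List.countP_cons, triplesCnt]
        have ih' := ih
        simp only [List.drop_succ_cons, List.drop_zero] at ih'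
        by_cases hc : x = y ∧ y = z
        · simp [hc.1, hc.2] at ih' ⊢; omega
        · have hb : ((x == y) && (y == z)) = false := by
            rcases (not_and_or.mp hc) with h | h <;> simp [h]
          simp only [hb, if_neg hc]
          simpa using ih'

-- the core identity: A's look-back count = pairs − triples − front correction
lemma cntA_eq_pairs_sub_triples : ∀ (l : List String) (p : Option String),
    cntA p l = pairsCnt l - triplesCnt l - frontRun p l := by
  intro l
  induction l with
  | nil => intro p; simp [cntA, pairsCnt, triplesCnt, frontRun]
  | cons x t ih =>
    intro p
    cases t with
    | nil => simp [cntA, pairsCnt, triplesCnt, frontRun]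
    | cons y rest =>
      simp only [cntA, pairsCnt]
      rw [ih (some x)]
      cases rest with
      | nil =>
        simp only [triplesCnt, frontRun]
        by_cases hxy : x = y
        · subst hxy
          by_cases hp : some x = p <;> simp [hp]
        · simp [hxy]
      | cons z rs =>
        simp only [triplesCnt, frontRun]
        by_cases hxy : x = y
        · subst hxy
          by_cases hyz : x = z
          · subst hyz
            by_cases hp : some x = p <;> simp [hp]
          · by_cases hp : some x = p <;>
              simp [fun h : x = z => hyz h, hp] <;> ring
        · have h1 : ¬ (x = y ∧ some y ≠ p) := fun h => hxy h.1
          have h2 : ¬ (x = y ∧ y = z) := fun h => hxy h.1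
          have h3 : ¬ (x = y ∧ some y = p) := fun h => hxy h.1
          have h4 : ¬ (y = z ∧ z = x) := fun h => hxy (h.2 ▸ h.1).symm
          simp [h4, hxy]

lemma ports_agree (st : String) : count_adjacent_pairs st = count_adjacent_pairs_alt st := by
  unfold count_adjacent_pairs count_adjacent_pairs_alt
  by_cases he : st = ""
  · simp [he]
  · simp only [he, if_false]
    set a := PySem.Str.split₀ (PySem.Str.lower st) with ha
    have hs1 : PySem.List.slice a (some 1) none = a.drop 1 := by
      simpa using PySem.List.slice_from_natCast (xs := a) (a := 1)
    have hs2 : PySem.List.slice a (some 2) none = a.drop 2 := by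
      simpa using PySem.List.slice_from_natCast (xs := a) (a := 2)
    rw [foldA_eq_cntA a, hs1, hs2, zip_pairs_eq a, zip_triples_eq a,
        cntA_eq_pairs_sub_triples a none]
    have : frontRun none a = 0 := by
      cases a with
      | nil => rfl
      | cons x t => cases t with
        | nil => rfl
        | cons y r => simp [frontRun]
    rw [this]
    ring

-- ===== VERDICT (by name: the statement is the Claim_ definition above) =====
theorem count_adjacent_pairs_spec : Claim_equal_count_adjacent_pairs := by
  intro st _
  unfold Spec_count_adjacent_pairs
  exact ports_agree st
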